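-- pv_equiv track=rewrite | github.com/cc1300386495/LuoGu | 2022-11/P1591.py | calc
-- ===== SOURCE A (Python) =====
-- from math import factorial
--
-- def calc(n, a):
--     res = factorial(n)
--     cnt = 0
--     while res:
--         if res % 10 == a:  # 取结果的每一位进行比较
--             cnt += 1
--         res = res // 10
--     return cnt
-- ===== SOURCE B (Python) =====
-- from math import factorial
--
-- def calc(n, a):
--     s = str(factorial(n))
--     return sum(1 for c in s if int(c) == a)
-- ===== Notes on version B (the rewrite author's own statement) =====
-- stated objective: faster
-- what changed: B counts matching digits by iterating the decimal string of factorial(n) once (int(c) == a per character) instead of A's repeated bignum mod-10 / floor-div-10 extraction loop.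
import Mathlib
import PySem

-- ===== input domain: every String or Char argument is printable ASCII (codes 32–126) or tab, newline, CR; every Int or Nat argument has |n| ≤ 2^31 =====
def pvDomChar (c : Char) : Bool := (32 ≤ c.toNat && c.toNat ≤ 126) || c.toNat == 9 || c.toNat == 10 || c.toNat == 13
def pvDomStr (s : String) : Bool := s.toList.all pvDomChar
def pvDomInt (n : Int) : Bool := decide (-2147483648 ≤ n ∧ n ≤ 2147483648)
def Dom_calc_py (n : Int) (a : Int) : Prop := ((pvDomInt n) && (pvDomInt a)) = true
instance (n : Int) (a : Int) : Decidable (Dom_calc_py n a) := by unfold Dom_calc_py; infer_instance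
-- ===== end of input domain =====

-- B counts matching digits by iterating the decimal string of factorial(n) instead of A's
-- arithmetic mod/div digit-extraction loop; equivalence proved for all n ≥ 0 (A raises ValueError on n < 0).


-- ===== PORT A =====
-- A's while loop; res = factorial(n) is a nonnegative integer, so Python's res % 10 and
-- res // 10 coincide with Nat `%` and `/` here (exact on the admitted domain n ≥ 0).
def calcLoop (a : Int) (res : Nat) (cnt : Int) : Int :=
  if res = 0 then cnt
  else calcLoop a (res / 10) (if ((res % 10 : Nat) : Int) = a then cnt + 1 else cnt)
decreasing_by exact Nat.div_lt_self (Nat.pos_of_ne_zero (by assumption)) (by norm_num)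

def calc_py (n : Int) (a : Int) : Int :=
  calcLoop a (Nat.factorial n.toNat) 0

-- ===== PORT B =====
-- int(c) for a decimal digit character c is c.toNat - 48 (exact: every character of
-- str(factorial(n)) with n ≥ 0 is a digit '0'..'9').
def calc_py_alt (n : Int) (a : Int) : Int :=
  (((PySem.Int.toStr ((Nat.factorial n.toNat : Nat) : Int)).toList.filter
      (fun c => decide (((c.toNat : Int) - 48) = a))).length : Int)

-- ===== PRECONDITION & SPEC =====
-- Pre_ excludes exactly n < 0, where math.factorial raises ValueError in A (and in B).
def Pre_calc_py (n : Int) (a : Int) : Prop := 0 ≤ n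
instance (n : Int) (a : Int) : Decidable (Pre_calc_py n a) := by unfold Pre_calc_py; infer_instance
def pvWitness_calc_py : Int × Int := (5, 2)
def Spec_calc_py (n : Int) (a : Int) (out : Int) : Prop := out = calc_py_alt n a
instance (n : Int) (a : Int) (out : Int) : Decidable (Spec_calc_py n a out) := by unfold Spec_calc_py; infer_instance

-- ===== CLAIM (what is proved, stated in full; the proofs are below) =====
def Claim_equal_calc_py : Prop := ∀ (n : Int) (a : Int), Dom_calc_py n a → Pre_calc_py n a → Spec_calc_py n a (calc_py n a)

-- ===== LEMMAS AND PROOFS =====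

-- A's loop counts exactly the base-10 digits (Nat.digits) equal to a.
lemma calcLoop_eq_digits (a : Int) (m : Nat) (cnt : Int) :
    calcLoop a m cnt =
      cnt + (((Nat.digits 10 m).filter (fun d : Nat => decide ((d : Int) = a))).length : Int) := by
  induction m using Nat.strong_induction_on generalizing cnt with
  | _ m ih =>
    rw [calcLoop]
    by_cases h : m = 0
    · simp [h]
    · rw [if_neg h, ih (m / 10) (Nat.div_lt_self (Nat.pos_of_ne_zero h) (by norm_num)),
        Nat.digits_def' (by norm_num : (1:Nat) < 10) (Nat.pos_of_ne_zero h)]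
      rw [List.filter_cons]
      split_ifs with h1 h2 h2
      · simp; ring
      · simp at h2; exact absurd h1 h2
      · simp at h2; exact absurd h2 h1
      · simp

-- Nat.toDigits via Nat.digits (for positive m).
lemma toDigitsCore_eq (fuel m : Nat) (ds : List Char) (hm : 0 < m) (hf : m < fuel) :
    Nat.toDigitsCore 10 fuel m ds = ((Nat.digits 10 m).map Nat.digitChar).reverse ++ ds := by
  induction fuel generalizing m ds with
  | zero => omega
  | succ f ih =>
    rw [Nat.toDigitsCore]
    rw [Nat.digits_def' (by norm_num : (1:Nat) < 10) hm]
    by_cases h : m / 10 = 0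
    · simp [h]
    · rw [if_neg h, ih (m / 10) (Nat.digitChar (m % 10) :: ds) (Nat.pos_of_ne_zero h)
        (by have := Nat.div_lt_self hm (by norm_num : (1:Nat) < 10); omega)]
      simp

lemma toDigits_eq (m : Nat) (hm : 0 < m) :
    Nat.toDigits 10 m = ((Nat.digits 10 m).map Nat.digitChar).reverse := by
  have := toDigitsCore_eq (m + 1) m [] hm (by omega)
  simpa [Nat.toDigits] using this

lemma digitChar_val (d : Nat) (hd : d < 10) :
    ((Nat.digitChar d).toNat : Int) - 48 = (d : Int) := by
  interval_cases d <;> decide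

-- ===== VERDICT (by name: the statement is the Claim_ definition above) =====
theorem calc_py_spec : Claim_equal_calc_py := by
  intro n a _ _
  unfold Spec_calc_py calc_py calc_py_alt
  set m := Nat.factorial n.toNat with hm
  have hmpos : 0 < m := Nat.factorial_pos _
  rw [calcLoop_eq_digits]
  have htc : (PySem.Int.toStr ((m : Nat) : Int)).toList = Nat.toDigits 10 m := by
    rw [PySem.Int.toList_toStr, PySem.Int.toChars,
      if_neg (not_lt.mpr (Int.natCast_nonneg m))]
    simp
  rw [htc, toDigits_eq m hmpos, List.filter_reverse, List.length_reverse, List.filter_map,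
    List.length_map]
  have hfil : (Nat.digits 10 m).filter ((fun c => decide (((c.toNat : Int) - 48) = a)) ∘ Nat.digitChar)
      = (Nat.digits 10 m).filter (fun d : Nat => decide ((d : Int) = a)) := by
    apply List.filter_congr
    intro d hd
    have hlt : d < 10 := Nat.digits_lt_base (by norm_num) hd
    simp [Function.comp, digitChar_val d hlt]
  rw [hfil]
  ring
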